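-- pv_equiv track=rewrite | github.com/AdrienBolling/TimeSeriesUnifiedToolbox | src/tsut/components/nodes/transforms/feature_selection/correlation_filter.py | _apply_preference
-- ===== SOURCE A (Python) =====
-- def _apply_preference(
--     candidate_cols: list[str],
--     preferred: list[str],
-- ) -> list[str]:
--     """Return *candidate_cols* reordered with preferred names first.
--
--     Preserves the original relative order inside each group. Names in
--     *preferred* that are not present in *candidate_cols* are ignored.
--     """
--     if not preferred:
--         return list(candidate_cols)
--     preferred_set = set(preferred)
--     head = [c for c in candidate_cols if c in preferred_set]
--     tail = [c for c in candidate_cols if c not in preferred_set]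
--     return head + tail
-- ===== SOURCE B (Python) =====
-- def _apply_preference(
--     candidate_cols: list[str],
--     preferred: list[str],
-- ) -> list[str]:
--     """Return candidate_cols reordered with preferred names first (stable)."""
--     preferred_set = set(preferred)
--     return sorted(candidate_cols, key=lambda c: c not in preferred_set)
-- ===== Notes on version B (the rewrite author's own statement) =====
-- stated objective: idiomatic
-- what changed: Replaces A's early return plus two list-comprehension partition scans with a single stable sort keyed on non-membership in the preferred set, relying on sort stability for order preservation.
import Mathlib
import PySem

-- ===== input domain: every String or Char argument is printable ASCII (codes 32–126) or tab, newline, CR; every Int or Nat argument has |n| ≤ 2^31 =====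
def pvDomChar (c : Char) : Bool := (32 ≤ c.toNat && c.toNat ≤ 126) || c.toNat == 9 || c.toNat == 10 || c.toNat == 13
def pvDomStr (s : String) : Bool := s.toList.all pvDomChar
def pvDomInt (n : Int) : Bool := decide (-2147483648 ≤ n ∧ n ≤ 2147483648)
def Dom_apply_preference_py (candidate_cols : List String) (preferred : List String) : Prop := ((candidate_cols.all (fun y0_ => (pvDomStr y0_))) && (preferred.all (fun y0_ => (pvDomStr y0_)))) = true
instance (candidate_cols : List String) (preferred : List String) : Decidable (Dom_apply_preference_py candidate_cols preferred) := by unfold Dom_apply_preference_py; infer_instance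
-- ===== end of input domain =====

-- B replaces A's two partition comprehensions with one stable sort keyed on non-membership (idiomatic one-liner).

-- ===== PORT A =====
def apply_preference_py (candidate_cols : List String) (preferred : List String) : List String :=
  if preferred = [] then candidate_cols
  else
    let preferred_set : PySem.Set String := PySem.Set.ofList preferred
    let head := candidate_cols.filter (fun c => PySem.Set.contains preferred_set c)
    let tail := candidate_cols.filter (fun c => !PySem.Set.contains preferred_set c)
    head ++ tail

-- ===== PORT B =====
def apply_preference_py_alt (candidate_cols : List String) (preferred : List String) : List String :=
  let preferred_set : PySem.Set String := PySem.Set.ofList preferred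
  PySem.List.sorted candidate_cols (fun c => !PySem.Set.contains preferred_set c) false

-- ===== PRECONDITION & SPEC =====
def Spec_apply_preference_py (candidate_cols : List String) (preferred : List String) (out : List String) : Prop := out = apply_preference_py_alt candidate_cols preferred
instance (candidate_cols : List String) (preferred : List String) (out : List String) : Decidable (Spec_apply_preference_py candidate_cols preferred out) := by unfold Spec_apply_preference_py; infer_instance

-- ===== CLAIM (what is proved, stated in full; the proofs are below) =====
def Claim_equal_apply_preference_py : Prop := ∀ (candidate_cols : List String) (preferred : List String), Dom_apply_preference_py candidate_cols preferred → Spec_apply_preference_py candidate_cols preferred (apply_preference_py candidate_cols preferred)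

-- ===== LEMMAS AND PROOFS =====

-- inserting x before every element of T and after every element of F
theorem insertBy_split {α : Type} (before : α → α → Bool) (x : α) (F T : List α)
    (hF : ∀ y ∈ F, before x y = false) (hT : ∀ y ∈ T, before x y = true) :
    PySem.List.insertBy before x (F ++ T) = F ++ x :: T := by
  induction F with
  | nil =>
    cases T with
    | nil => simp [PySem.List.insertBy]
    | cons t ts => simp [PySem.List.insertBy, hT t (by simp)]
  | cons f fs ih =>
    have hxf : before x f = false := hF f (by simp)
    simp only [List.cons_append, PySem.List.insertBy, hxf, Bool.false_eq_true, if_false]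
    simp [ih (fun y hy => hF y (by simp [hy]))]

-- a stable insertion sort by a Bool key is the stable partition: false-keyed first, then true-keyed
theorem sorted_bool_key {α : Type} (key : α → Bool) :
    ∀ (xs F T : List α), (∀ y ∈ F, key y = false) → (∀ y ∈ T, key y = true) →
    xs.foldl (fun acc x => PySem.List.insertBy (fun a b => decide (key a < key b)) x acc) (F ++ T)
      = (F ++ xs.filter (fun x => !key x)) ++ (T ++ xs.filter key) := by
  intro xs
  induction xs with
  | nil => intro F T _ _; simp
  | cons x rest ih =>
    intro F T hF hT
    simp only [List.foldl_cons]
    cases hx : key x with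
    | false =>
      have hins : PySem.List.insertBy (fun a b => decide (key a < key b)) x (F ++ T) = F ++ x :: T := by
        apply insertBy_split
        · intro y hy; simp [hx, hF y hy]
        · intro y hy; simp [hx, hT y hy]
      rw [hins]
      have hsplit : F ++ x :: T = (F ++ [x]) ++ T := by simp
      have hF' : ∀ y ∈ F ++ [x], key y = false := by
        intro y hy
        rcases List.mem_append.mp hy with h | h
        · exact hF y h
        · rw [List.mem_singleton.mp h]; exact hx
      rw [hsplit, ih (F ++ [x]) T hF' hT]
      simp [List.filter_cons, hx]
    | true =>
      have hins : PySem.List.insertBy (fun a b => decide (key a < key b)) x (F ++ T) = (F ++ T) ++ [x] := by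
        apply PySem.List.insertBy_of_forall_not_before
        intro y hy; simp [hx]
      rw [hins]
      have hsplit : (F ++ T) ++ [x] = F ++ (T ++ [x]) := by simp
      have hT' : ∀ y ∈ T ++ [x], key y = true := by
        intro y hy
        rcases List.mem_append.mp hy with h | h
        · exact hT y h
        · rw [List.mem_singleton.mp h]; exact hx
      rw [hsplit, ih F (T ++ [x]) hF hT']
      rw [List.filter_cons, List.filter_cons]
      simp [hx]

theorem alt_eq_partition (candidate_cols preferred : List String) :
    apply_preference_py_alt candidate_cols preferred
      = candidate_cols.filter (fun c => PySem.Set.contains (PySem.Set.ofList preferred) c)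
        ++ candidate_cols.filter (fun c => !PySem.Set.contains (PySem.Set.ofList preferred) c) := by
  unfold apply_preference_py_alt
  rw [PySem.List.sorted_eq_foldl_insertBy]
  have h := sorted_bool_key (fun c => !PySem.Set.contains (PySem.Set.ofList preferred) c)
      candidate_cols [] [] (by simp) (by simp)
  simp only [List.nil_append, List.append_nil] at h
  rw [h]
  simp

-- ===== VERDICT (by name: the statement is the Claim_ definition above) =====
theorem apply_preference_py_spec : Claim_equal_apply_preference_py := by
  intro candidate_cols preferred _
  unfold Spec_apply_preference_py apply_preference_py
  rw [alt_eq_partition]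
  split_ifs with h
  · subst h
    simp [PySem.Set.ofList, PySem.Set.contains]
  · rfl
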